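-- pv_equiv track=rewrite | github.com/adamuk01/wmccl-cx-scripts | normalise-rider-names.py | normalise_name
-- ===== SOURCE A (Python) =====
-- def normalise_name(name: str) -> str:
--     if not name:
--         return ""
--     name = name.strip()
--     words = name.split()
--     fixed_words = []
--     for word in words:
--         parts = word.split("-")
--         parts = [p.capitalize() if p else p for p in parts]
--         fixed_words.append("-".join(parts))
--     return " ".join(fixed_words)
-- ===== SOURCE B (Python) =====
-- def normalise_name(name: str) -> str:
--     if not name:
--         return ""
--     fixed_words = []
--     for word in name.split():
--         buf = []
--         new_part = True
--         for ch in word: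
--             if ch == '-':
--                 buf.append(ch)
--                 new_part = True
--             elif new_part:
--                 buf.append(ch.upper())
--                 new_part = False
--             else:
--                 buf.append(ch.lower())
--         fixed_words.append(''.join(buf))
--     return ' '.join(fixed_words)
-- ===== Notes on version B (the rewrite author's own statement) =====
-- stated objective: simpler
-- what changed: B replaces A's strip plus nested hyphen-split/capitalize/join per word with a single state-machine pass over each whitespace-separated word (uppercase a character at a word or hyphen boundary, lowercase otherwise), dropping the redundant strip and the inner split/join entirely.
import Mathlib
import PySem

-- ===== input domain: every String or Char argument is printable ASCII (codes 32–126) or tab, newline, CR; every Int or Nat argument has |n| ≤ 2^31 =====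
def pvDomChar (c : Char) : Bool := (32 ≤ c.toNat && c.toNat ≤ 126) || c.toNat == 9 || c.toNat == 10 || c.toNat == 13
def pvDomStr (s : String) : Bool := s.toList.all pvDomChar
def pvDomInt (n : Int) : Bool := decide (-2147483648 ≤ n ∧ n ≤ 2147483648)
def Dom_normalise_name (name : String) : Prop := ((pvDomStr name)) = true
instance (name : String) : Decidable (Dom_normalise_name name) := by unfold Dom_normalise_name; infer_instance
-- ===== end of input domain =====

-- B replaces A's strip + nested split('-')/capitalize/join per word by a single
-- state-machine pass over each word (objective: simpler); return values only, no mutation.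

-- ===== PORT A =====
-- p.capitalize(): first char uppercased, rest lowercased (exact on the ASCII domain)
def pyCapitalize (p : List Char) : List Char :=
  match p with
  | [] => []
  | c :: rest => PySem.Chars.upperChar c :: rest.map PySem.Chars.lowerChar

def normalise_name (name : String) : String :=
  if name = "" then ""
  else
    let stripped := PySem.Chars.strip name.toList
    let words := PySem.Chars.split₀ stripped
    let fixed_words := words.map (fun w =>
      let parts := PySem.Chars.splitOn w ['-']
      let parts := parts.map (fun p => if p.isEmpty then p else pyCapitalize p)
      PySem.Chars.join ['-'] parts)
    String.ofList (PySem.Chars.join [' '] fixed_words)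

-- ===== PORT B =====
-- the loop body of B's inner per-word loop (buf, new_part)
def bStep (st : List Char × Bool) (ch : Char) : List Char × Bool :=
  if ch = '-' then (st.1 ++ [ch], true)
  else if st.2 then (st.1 ++ [PySem.Chars.upperChar ch], false)
  else (st.1 ++ [PySem.Chars.lowerChar ch], false)

def normalise_name_alt (name : String) : String :=
  if name = "" then ""
  else
    let fixed_words := (PySem.Str.split₀ name).map (fun w =>
      String.ofList (w.toList.foldl bStep ([], true)).1)
    PySem.Str.join " " fixed_words

-- ===== PRECONDITION & SPEC =====
def Spec_normalise_name (name : String) (out : String) : Prop := out = normalise_name_alt name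
instance (name : String) (out : String) : Decidable (Spec_normalise_name name out) := by unfold Spec_normalise_name; infer_instance

-- ===== CLAIM (what is proved, stated in full; the proofs are below) =====
def Claim_equal_normalise_name : Prop := ∀ (name : String), Dom_normalise_name name → Spec_normalise_name name (normalise_name name)

-- ===== LEMMAS AND PROOFS =====

-- recursive specification of split₀ (whitespace splitting)
def wsp (pre : List Char) : List Char → List (List Char)
  | [] => if pre = [] then [] else [pre]
  | c :: r =>
      if PySem.Chars.isspace c then (if pre = [] then wsp [] r else pre :: wsp [] r)
      else wsp (pre ++ [c]) r

-- recursive specification of splitOn · ['-']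
def mySplit (pre : List Char) : List Char → List (List Char)
  | [] => [pre]
  | c :: r => if c = '-' then pre :: mySplit [] r else mySplit (pre ++ [c]) r

-- recursive form of B's inner loop
def fixRec (b : Bool) : List Char → List Char
  | [] => []
  | c :: r =>
      if c = '-' then '-' :: fixRec true r
      else (if b then PySem.Chars.upperChar c else PySem.Chars.lowerChar c) :: fixRec false r

theorem go0_spec (l : List Char) : ∀ cur acc,
    PySem.Chars.split₀.go l cur acc = acc.reverse ++ wsp cur.reverse l := by
  induction l with
  | nil =>
      intro cur acc
      simp [PySem.Chars.split₀.go, wsp]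
      by_cases h : cur = [] <;> simp [h]
  | cons c r ih =>
      intro cur acc
      by_cases hs : PySem.Chars.isspace c
      · by_cases h : cur = []
        · subst h; simp [PySem.Chars.split₀.go, hs, wsp, ih]
        · simp [PySem.Chars.split₀.go, hs, List.isEmpty_iff, h, wsp, ih,
            (by simpa using h : ¬ cur.reverse = [])]
      · simp [PySem.Chars.split₀.go, hs, wsp, ih]

theorem wsp_allspace (t : List Char) : ∀ pre, (∀ c ∈ t, PySem.Chars.isspace c) →
    wsp pre t = if pre = [] then [] else [pre] := by
  induction t with
  | nil => intro pre _; simp [wsp]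
  | cons c r ih =>
      intro pre h
      have hc : PySem.Chars.isspace c := h c (by simp)
      have hr := ih [] (fun x hx => h x (by simp [hx]))
      by_cases hp : pre = [] <;> simp [wsp, hc, hp, hr]

theorem wsp_append_spaces (s t : List Char) (h : ∀ c ∈ t, PySem.Chars.isspace c) :
    ∀ pre, wsp pre (s ++ t) = wsp pre s := by
  induction s with
  | nil =>
      intro pre
      simpa [wsp] using wsp_allspace t pre h
  | cons c r ih =>
      intro pre
      by_cases hs : PySem.Chars.isspace c <;>
        by_cases hp : pre = [] <;> simp [wsp, hs, hp, ih]

theorem wsp_dropWhile (s : List Char) :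
    wsp [] (List.dropWhile PySem.Chars.isspace s) = wsp [] s := by
  induction s with
  | nil => rfl
  | cons c r ih =>
      by_cases hs : PySem.Chars.isspace c <;> simp [List.dropWhile, hs, wsp, ih]

theorem split0_strip (s : List Char) :
    PySem.Chars.split₀ (PySem.Chars.strip s) = PySem.Chars.split₀ s := by
  have base : ∀ t : List Char, PySem.Chars.split₀ t = wsp [] t := by
    intro t; simpa using go0_spec t [] []
  rw [base, base]
  have hl : wsp [] (PySem.Chars.lstrip s) = wsp [] s := by
    simpa [PySem.Chars.lstrip] using wsp_dropWhile s
  set u := PySem.Chars.lstrip s with hu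
  have hdecomp : u = PySem.Chars.rstrip u ++ (List.takeWhile PySem.Chars.isspace u.reverse).reverse := by
    simp only [PySem.Chars.rstrip]
    have h1 := congrArg List.reverse
      (List.takeWhile_append_dropWhile (p := PySem.Chars.isspace) (l := u.reverse))
    rw [List.reverse_append, List.reverse_reverse] at h1
    exact h1.symm
  have hsp : ∀ c ∈ (List.takeWhile PySem.Chars.isspace u.reverse).reverse, PySem.Chars.isspace c := by
    intro c hc
    exact List.mem_takeWhile_imp (by simpa using hc)
  calc wsp [] (PySem.Chars.strip s)
      = wsp [] (PySem.Chars.rstrip u) := by simp [PySem.Chars.strip, hu]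
    _ = wsp [] (PySem.Chars.rstrip u ++ (List.takeWhile PySem.Chars.isspace u.reverse).reverse) :=
        (wsp_append_spaces _ _ hsp []).symm
    _ = wsp [] u := by rw [← hdecomp]
    _ = wsp [] s := hl

theorem mySplit_hyphen (pre r) : mySplit pre ('-' :: r) = pre :: mySplit [] r := by
  simp [mySplit]

theorem mySplit_cons {c : Char} (hc : c ≠ '-') (pre r) :
    mySplit pre (c :: r) = mySplit (pre ++ [c]) r := by
  simp [mySplit, hc]

theorem goSplit_spec : ∀ (fuel : Nat) (l cur : List Char) (acc : List (List Char)),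
    l.length < fuel →
    PySem.Chars.splitOn.go ['-'] fuel l cur acc = acc.reverse ++ mySplit cur.reverse l := by
  intro fuel
  induction fuel with
  | zero => intro l cur acc h; omega
  | succ n ih =>
      intro l cur acc h
      cases l with
      | nil => simp [PySem.Chars.splitOn.go, mySplit]
      | cons c r =>
          by_cases hc : c = '-'
          · subst hc
            have hpre : List.isPrefixOf ['-'] ('-' :: r) = true := by
              simp [List.isPrefixOf]
            rw [show PySem.Chars.splitOn.go ['-'] (n + 1) ('-' :: r) cur acc
                = PySem.Chars.splitOn.go ['-'] n r [] (cur.reverse :: acc) from by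
              simp [PySem.Chars.splitOn.go, hpre]]
            rw [ih r [] (cur.reverse :: acc) (by simpa using Nat.lt_of_succ_lt_succ h)]
            rw [mySplit_hyphen]
            simp
          · have hpre : List.isPrefixOf ['-'] (c :: r) = false := by
              simp [List.isPrefixOf]
              exact fun h' => hc h'.symm
            simp only [PySem.Chars.splitOn.go, hpre, Bool.false_eq_true, if_false]
            rw [ih r (c :: cur) acc (by simpa using Nat.lt_of_succ_lt_succ h)]
            rw [mySplit_cons hc]
            simp

theorem splitOn_hyphen (cs : List Char) :
    PySem.Chars.splitOn cs ['-'] = mySplit [] cs := by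
  simpa using goSplit_spec (cs.length + 1) cs [] [] (by omega)

theorem cap_append (pre : List Char) (c : Char) (h : pre ≠ []) :
    pyCapitalize (pre ++ [c]) = pyCapitalize pre ++ [PySem.Chars.lowerChar c] := by
  cases pre with
  | nil => exact absurd rfl h
  | cons a t => simp [pyCapitalize]

theorem mySplit_ne_nil (cs : List Char) : ∀ pre, mySplit pre cs ≠ [] := by
  induction cs with
  | nil => intro pre; simp [mySplit]
  | cons c r ih => intro pre; by_cases hc : c = '-' <;> simp [mySplit, hc, ih]

theorem capIf_eq (p : List Char) :
    (if p.isEmpty then p else pyCapitalize p) = pyCapitalize p := by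
  cases p <;> simp [pyCapitalize]

theorem fixRec_hyphen (b : Bool) (r : List Char) :
    fixRec b ('-' :: r) = '-' :: fixRec true r := by
  simp [fixRec]

theorem fixRec_cons {c : Char} (hc : c ≠ '-') (b : Bool) (r : List Char) :
    fixRec b (c :: r)
      = (if b then PySem.Chars.upperChar c else PySem.Chars.lowerChar c) :: fixRec false r := by
  simp [fixRec, hc]

theorem main_ind (cs : List Char) :
    (PySem.Chars.join ['-'] ((mySplit [] cs).map pyCapitalize) = fixRec true cs) ∧
    (∀ pre, pre ≠ [] →
      PySem.Chars.join ['-'] ((mySplit pre cs).map pyCapitalize) = pyCapitalize pre ++ fixRec false cs) := by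
  induction cs with
  | nil =>
      constructor
      · simp [mySplit, fixRec, PySem.Chars.join_singleton, pyCapitalize]
      · intro pre _; simp [mySplit, fixRec, PySem.Chars.join_singleton]
  | cons c r ih =>
      obtain ⟨ih1, ih2⟩ := ih
      by_cases hc : c = '-'
      · subst hc
        obtain ⟨q, t, hq⟩ := List.exists_cons_of_ne_nil (mySplit_ne_nil r [])
        constructor
        · rw [mySplit_hyphen, hq, List.map_cons, List.map_cons, PySem.Chars.join_cons_cons,
            ← List.map_cons, ← hq, ih1, fixRec_hyphen]
          simp [pyCapitalize]
        · intro pre hpre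
          rw [mySplit_hyphen, hq, List.map_cons, List.map_cons, PySem.Chars.join_cons_cons,
            ← List.map_cons, ← hq, ih1, fixRec_hyphen]
          simp
      · constructor
        · rw [show mySplit [] (c :: r) = mySplit [c] r from mySplit_cons hc [] r,
            ih2 [c] (by simp), fixRec_cons hc]
          simp [pyCapitalize]
        · intro pre hpre
          rw [mySplit_cons hc, ih2 (pre ++ [c]) (by simp), cap_append pre c hpre,
            fixRec_cons hc]
          simp

theorem fold_spec (cs : List Char) : ∀ acc b,
    (cs.foldl bStep (acc, b)).1 = acc ++ fixRec b cs := by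
  induction cs with
  | nil => intro acc b; simp [fixRec]
  | cons c r ih =>
      intro acc b
      by_cases hc : c = '-'
      · simp [bStep, hc, ih, fixRec]
      · cases b <;> simp [bStep, hc, ih, fixRec]

-- ===== VERDICT (by name: the statement is the Claim_ definition above) =====
theorem normalise_name_spec : Claim_equal_normalise_name := by
  intro name _
  unfold Spec_normalise_name normalise_name normalise_name_alt
  by_cases h : name = ""
  · simp [h]
  · simp only [if_neg h]
    rw [← String.toList_inj]
    rw [PySem.Str.toList_join]
    simp only [String.toList_ofList, List.map_map]
    have hmapB : (List.map (String.toList ∘ fun w => String.ofList (w.toList.foldl bStep ([], true)).1)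
        (PySem.Str.split₀ name))
        = List.map (fun w => fixRec true w) (PySem.Chars.split₀ name.toList) := by
      rw [show (String.toList ∘ fun w : String => String.ofList (w.toList.foldl bStep ([], true)).1)
          = (fun w : List Char => fixRec true w) ∘ String.toList from ?_]
      · rw [← List.map_map, PySem.Str.split₀_map_toList]
      · funext w
        simp [Function.comp, fold_spec]
    rw [hmapB, split0_strip]
    congr 1
    apply List.map_congr_left
    intro w _
    rw [splitOn_hyphen]
    have := (main_ind w).1
    rw [← this]
    congr 1
    apply List.map_congr_left
    intro p _
    exact capIf_eq p
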